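-- pv_equiv track=rewrite | github.com/miliar/Code_Jam_Webscraper | solutions_python/solutions_year17_round0_nr3/383.py | answer
-- ===== SOURCE A (Python) =====
-- def answer(n, k):
--     if n % 2 == 1:
--         h, l = n // 2, n // 2
--     else:
--         h, l = n // 2, n // 2 - 1
--     if k == 1:
--         return h, l
--     if k % 2 == 0:
--         return answer(h, k // 2)
--     else:
--         return answer(l, k // 2)
-- ===== SOURCE B (Python) =====
-- def answer(n, k):
--     # Iterative descent: thread the segment size m through a loop instead of recursing.
--     m = n
--     while k != 1:
--         if k % 2 == 0:
--             m = m // 2                               # take the high half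
--         else:
--             m = m // 2 if m % 2 == 1 else m // 2 - 1  # take the low half
--         k //= 2
--     if m % 2 == 1:
--         return m // 2, m // 2
--     return m // 2, m // 2 - 1
-- ===== Notes on version B (the rewrite author's own statement) =====
-- stated objective: simpler
-- what changed: Replaces the recursive descent with an iterative while-loop that threads the current segment size m and halves k each step, computing the final (h,l) pair once after the loop.
import Mathlib
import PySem

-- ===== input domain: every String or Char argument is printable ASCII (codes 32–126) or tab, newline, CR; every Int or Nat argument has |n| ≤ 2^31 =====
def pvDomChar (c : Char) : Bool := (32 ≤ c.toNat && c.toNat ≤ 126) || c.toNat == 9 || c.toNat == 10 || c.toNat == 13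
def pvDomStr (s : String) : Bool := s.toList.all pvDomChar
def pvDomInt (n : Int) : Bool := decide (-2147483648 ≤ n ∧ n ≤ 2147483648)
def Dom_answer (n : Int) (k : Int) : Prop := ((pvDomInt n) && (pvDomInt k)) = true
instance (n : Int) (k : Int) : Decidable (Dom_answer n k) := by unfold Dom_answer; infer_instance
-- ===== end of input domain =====

-- B replaces A's recursive descent by an iterative loop threading the segment size; objective: simpler.
-- Pre_answer requires k ≥ 1: for k ≤ 0 the Python A recurses forever (RecursionError).


-- termination helper for both ports (k // 2 shrinks k.toNat when 2 ≤ k)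
theorem pvHalfLt (k : Int) (h : 2 ≤ k) : (PySem.Int.floordiv k 2).toNat < k.toNat := by
  rw [PySem.Int.floordiv_eq_ediv_of_pos (by omega)]
  omega

-- ===== PORT A =====
-- Recursive, as in the Python; the `k ≤ 0` branch is a totality guard only
-- (Python A never terminates there; such inputs are outside Pre_answer).
def answer (n : Int) (k : Int) : Int × Int :=
  let hl : Int × Int :=
    if PySem.Int.mod n 2 = 1 then (PySem.Int.floordiv n 2, PySem.Int.floordiv n 2)
    else (PySem.Int.floordiv n 2, PySem.Int.floordiv n 2 - 1)
  if k = 1 then hl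
  else if _hk : k ≤ 0 then hl  -- totality guard (outside Pre_answer)
  else if PySem.Int.mod k 2 = 0 then answer hl.1 (PySem.Int.floordiv k 2)
  else answer hl.2 (PySem.Int.floordiv k 2)
termination_by k.toNat
decreasing_by all_goals exact pvHalfLt k (by omega)

-- ===== PORT B =====
-- the (h, l) pair computed once, after the loop
def pvFinal (m : Int) : Int × Int :=
  if PySem.Int.mod m 2 = 1 then (PySem.Int.floordiv m 2, PySem.Int.floordiv m 2)
  else (PySem.Int.floordiv m 2, PySem.Int.floordiv m 2 - 1)

-- the `while k != 1` loop; stopping also at k ≤ 0 is a totality guard only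
-- (the Python loop never terminates there; such inputs are outside Pre_answer).
def pvLoop (m : Int) (k : Int) : Int × Int :=
  if h : 1 < k then
    let m' : Int :=
      if PySem.Int.mod k 2 = 0 then PySem.Int.floordiv m 2
      else if PySem.Int.mod m 2 = 1 then PySem.Int.floordiv m 2
      else PySem.Int.floordiv m 2 - 1
    pvLoop m' (PySem.Int.floordiv k 2)
  else pvFinal m
termination_by k.toNat
decreasing_by exact pvHalfLt k (by omega)

def answer_alt (n : Int) (k : Int) : Int × Int := pvLoop n k

-- ===== PRECONDITION & SPEC =====
-- Pre_answer excludes k ≤ 0, where Python A raises RecursionError (infinite recursion).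
def Pre_answer (n : Int) (k : Int) : Prop := 1 ≤ k
instance (n : Int) (k : Int) : Decidable (Pre_answer n k) := by unfold Pre_answer; infer_instance
def pvWitness_answer : Int × Int := (10, 3)
def Spec_answer (n : Int) (k : Int) (out : Int × Int) : Prop := out = answer_alt n k
instance (n : Int) (k : Int) (out : Int × Int) : Decidable (Spec_answer n k out) := by unfold Spec_answer; infer_instance

-- ===== CLAIM (what is proved, stated in full; the proofs are below) =====
def Claim_equal_answer : Prop := ∀ (n : Int) (k : Int), Dom_answer n k → Pre_answer n k → Spec_answer n k (answer n k)

-- ===== LEMMAS AND PROOFS =====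
theorem answer_eq_loop (k n : Int) (hk : 1 ≤ k) : answer n k = pvLoop n k := by
  rw [answer, pvLoop]
  by_cases h1 : k = 1
  · simp [h1, pvFinal]
  · have h2 : 2 ≤ k := by omega
    have hdiv : PySem.Int.floordiv k 2 = k / 2 :=
      PySem.Int.floordiv_eq_ediv_of_pos (by omega)
    have hk' : 1 ≤ PySem.Int.floordiv k 2 := by rw [hdiv]; omega
    have ih : ∀ m : Int, answer m (PySem.Int.floordiv k 2) = pvLoop m (PySem.Int.floordiv k 2) :=
      fun m => answer_eq_loop _ m hk'
    rw [hdiv] at ih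
    simp only [if_neg h1, dif_neg (by omega : ¬ k ≤ 0), dif_pos (by omega : 1 < k)]
    by_cases hd : (2:Int) ∣ k <;> by_cases hn : n % 2 = 1 <;>
      simp [hd, hn, ih, PySem.Int.mod_eq_zero_iff_dvd,
        PySem.Int.mod_eq_emod_of_pos (show (0:Int) < 2 by omega),
        PySem.Int.floordiv_eq_ediv_of_pos (show (0:Int) < 2 by omega)]
termination_by k.toNat
decreasing_by all_goals exact pvHalfLt k (by omega)

-- ===== VERDICT (by name: the statement is the Claim_ definition above) =====
theorem answer_spec : Claim_equal_answer := by
  intro n k _ hpre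
  unfold Spec_answer answer_alt
  exact answer_eq_loop k n hpre
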